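-- pv_equiv track=rewrite | github.com/elmuerte/munin-phue | munin-alert-phue.py | get_max_status
-- ===== SOURCE A (Python) =====
-- LEVEL_NORMAL=0
--
-- LEVEL_WARNING=1
--
-- LEVEL_CRITICAL=2
--
-- def get_max_status(current_state):
--     """
--     Get the highest state
--     """
--     maxState = LEVEL_NORMAL
--     for entry in current_state['entries'].values():
--         if len(entry['criticals']) > 0:
--             return LEVEL_CRITICAL
--         elif len(entry['warnings']) > 0 and maxState < LEVEL_WARNING:
--             maxState = LEVEL_WARNING
--     return maxState
-- ===== SOURCE B (Python) =====
-- LEVEL_NORMAL=0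
--
-- LEVEL_WARNING=1
--
-- LEVEL_CRITICAL=2
--
-- def get_max_status(current_state):
--     """
--     Get the highest state
--     """
--     entries = current_state['entries'].values()
--     if any(len(e['criticals']) > 0 for e in entries):
--         return LEVEL_CRITICAL
--     if any(len(e['warnings']) > 0 for e in entries):
--         return LEVEL_WARNING
--     return LEVEL_NORMAL
-- ===== Notes on version B (the rewrite author's own statement) =====
-- stated objective: idiomatic
-- what changed: Replaced the single accumulator loop (early return on criticals, maxState flag for warnings) by two separate short-circuiting any() scans: first for a nonempty 'criticals' list, then for a nonempty 'warnings' list.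
import Mathlib
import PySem

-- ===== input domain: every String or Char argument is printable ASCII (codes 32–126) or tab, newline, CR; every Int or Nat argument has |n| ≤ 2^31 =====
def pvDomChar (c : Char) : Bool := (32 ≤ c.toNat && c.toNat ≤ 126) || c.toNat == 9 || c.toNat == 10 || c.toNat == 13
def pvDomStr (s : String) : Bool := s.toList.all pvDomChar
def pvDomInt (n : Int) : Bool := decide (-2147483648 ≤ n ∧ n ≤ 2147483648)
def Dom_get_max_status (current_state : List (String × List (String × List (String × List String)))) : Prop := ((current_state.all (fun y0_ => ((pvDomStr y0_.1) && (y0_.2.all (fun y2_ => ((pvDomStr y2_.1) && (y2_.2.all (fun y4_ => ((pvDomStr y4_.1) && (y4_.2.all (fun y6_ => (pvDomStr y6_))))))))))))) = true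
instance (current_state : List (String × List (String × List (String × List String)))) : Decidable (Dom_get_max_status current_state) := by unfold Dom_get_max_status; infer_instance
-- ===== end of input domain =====

-- B changes A's accumulator loop into two short-circuiting scans (idiomatic); equivalence is
-- about the return value on inputs where A raises no KeyError (see Pre_).

-- ===== PORT A =====
-- A's loop over current_state['entries'].values(); the `none` branches are KeyErrors,
-- excluded by Pre_get_max_status (the default 0 / [] there is never relied on inside Pre_).
def goA : List (List (String × List String)) → Int → Int
  | [], maxState => maxState
  | e :: rest, maxState =>
    match e.lookup "criticals" with
    | none => 0  -- KeyError: excluded by Pre_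
    | some crit =>
      if crit.length > 0 then 2
      else
        match e.lookup "warnings" with
        | none => 0  -- KeyError: excluded by Pre_
        | some warn =>
          if warn.length > 0 ∧ maxState < 1 then goA rest 1
          else goA rest maxState

def get_max_status (current_state : List (String × List (String × List (String × List String)))) : Int :=
  match current_state.lookup "entries" with
  | none => 0  -- KeyError: excluded by Pre_
  | some entries => goA (entries.map (·.2)) 0

-- ===== PORT B =====
def critB (e : List (String × List String)) : Bool :=
  decide (((e.lookup "criticals").getD []).length > 0)  -- lookup is some on Pre_ inputs
def warnB (e : List (String × List String)) : Bool :=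
  decide (((e.lookup "warnings").getD []).length > 0)

def get_max_status_alt (current_state : List (String × List (String × List (String × List String)))) : Int :=
  match current_state.lookup "entries" with
  | none => 0  -- KeyError: excluded by Pre_
  | some entries =>
    let vs := entries.map (·.2)
    if vs.any critB then 2
    else if vs.any warnB then 1
    else 0

-- ===== PRECONDITION & SPEC =====
-- Exactly the inputs on which A returns (no KeyError): 'entries' is present, and every
-- entry A actually scans — i.e. every entry before the first one with a nonempty
-- 'criticals' list — has both a 'criticals' and a 'warnings' key.
def Pre_get_max_status (current_state : List (String × List (String × List (String × List String)))) : Prop :=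
  (current_state.lookup "entries").isSome = true ∧
  ∀ e ∈ (((current_state.lookup "entries").getD []).map (·.2)).takeWhile
          (fun e => ((e.lookup "criticals").getD []).isEmpty),
    (e.lookup "criticals").isSome = true ∧ (e.lookup "warnings").isSome = true
instance (current_state : List (String × List (String × List (String × List String)))) : Decidable (Pre_get_max_status current_state) := by unfold Pre_get_max_status; infer_instance

def pvWitness_get_max_status : (List (String × List (String × List (String × List String)))) :=
  [("entries", [("host", [("criticals", []), ("warnings", ["low disk"])])])]

def Spec_get_max_status (current_state : List (String × List (String × List (String × List String)))) (out : Int) : Prop := out = get_max_status_alt current_state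
instance (current_state : List (String × List (String × List (String × List String)))) (out : Int) : Decidable (Spec_get_max_status current_state out) := by unfold Spec_get_max_status; infer_instance

-- ===== CLAIM (what is proved, stated in full; the proofs are below) =====
def Claim_equal_get_max_status : Prop := ∀ (current_state : List (String × List (String × List (String × List String)))), Dom_get_max_status current_state → Pre_get_max_status current_state → Spec_get_max_status current_state (get_max_status current_state)

-- ===== LEMMAS AND PROOFS =====

-- B's value on a values-list, as a standalone function of the list
def bval (vs : List (List (String × List String))) : Int :=
  if vs.any critB then 2 else if vs.any warnB then 1 else 0

lemma bval_nonneg (vs : List (List (String × List String))) : 0 ≤ bval vs := by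
  unfold bval; split_ifs <;> norm_num

-- Loop invariant: A's loop computes the max of the accumulator and B's two-scan value,
-- provided every entry the loop scans has both keys.
lemma goA_eq (vs : List (List (String × List String))) (m : Int)
    (hpre : ∀ e ∈ vs.takeWhile (fun e => ((e.lookup "criticals").getD []).isEmpty),
      (e.lookup "criticals").isSome = true ∧ (e.lookup "warnings").isSome = true)
    (h0 : 0 ≤ m) (h1 : m ≤ 1) :
    goA vs m = max m (bval vs) := by
  induction vs generalizing m with
  | nil =>
    simp [goA, bval]; omega
  | cons e rest ih =>
    by_cases hc : ((e.lookup "criticals").getD []).isEmpty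
    · -- this entry's criticals list is empty (or missing, excluded below): loop continues
      have hmem : e ∈ (e :: rest).takeWhile
          (fun e => ((e.lookup "criticals").getD []).isEmpty) := by
        simp [List.takeWhile, hc]
      obtain ⟨hcs, hws⟩ := hpre e hmem
      obtain ⟨crit, hcrit⟩ := Option.isSome_iff_exists.mp hcs
      obtain ⟨warn, hwarn⟩ := Option.isSome_iff_exists.mp hws
      have hcempty : crit = [] := by
        have := hc; rw [hcrit] at this; simpa using this
      have hpre' : ∀ e ∈ rest.takeWhile
          (fun e => ((e.lookup "criticals").getD []).isEmpty),
          (e.lookup "criticals").isSome = true ∧ (e.lookup "warnings").isSome = true := by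
        intro x hx
        exact hpre x (by simp [List.takeWhile, hc]; exact .inr hx)
      have hcritB : critB e = false := by
        simp [critB, hcrit, hcempty]
      by_cases hw : warn.length > 0 ∧ m < 1
      · -- warnings nonempty and accumulator still 0: loop recurses with 1
        have : goA (e :: rest) m = goA rest 1 := by
          simp [goA, hcrit, hcempty, hwarn, hw]
        rw [this, ih 1 hpre' (by norm_num) (by norm_num)]
        have hwB : warnB e = true := by simp [warnB, hwarn]; omega
        have hm : m = 0 := by omega
        subst hm
        unfold bval
        simp [hcritB, hwB]
        split_ifs <;> omega
      · have : goA (e :: rest) m = goA rest m := by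
          simp only [goA, hcrit, hcempty, hwarn]
          simp only [List.length_nil, gt_iff_lt, lt_irrefl, if_false, ite_eq_right_iff]
          intro ha
          exact absurd ha hw
        rw [this, ih m hpre' h0 h1]
        -- the head entry cannot change the max: either its warnings are empty, or m = 1
        unfold bval
        rcases Classical.em (warn.length > 0) with hwl | hwl
        · have hm : m = 1 := by
            rcases Classical.em (m < 1) with h | h
            · exact absurd ⟨hwl, h⟩ hw
            · omega
          subst hm
          have hwB : warnB e = true := by simp [warnB, hwarn]; omega
          simp [hcritB, hwB]
          split_ifs <;> omega
        · have hwB : warnB e = false := by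
            have h0 : ¬ 0 < warn.length := by omega
            simp [warnB, hwarn, h0]
          simp [hcritB, hwB]
    · -- nonempty criticals: both sides return 2
      obtain ⟨crit, hcrit⟩ : ∃ l, e.lookup "criticals" = some l := by
        cases h : e.lookup "criticals" with
        | none => rw [h] at hc; simp at hc
        | some l => exact ⟨l, rfl⟩
      have hlen : crit.length > 0 := by
        rw [hcrit] at hc
        simp [List.isEmpty_iff] at hc
        exact List.length_pos_of_ne_nil hc
      have hcritB : critB e = true := by simp [critB, hcrit]; omega
      have : goA (e :: rest) m = 2 := by simp [goA, hcrit, hlen]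
      rw [this]
      unfold bval
      simp [hcritB]
      omega

-- ===== VERDICT (by name: the statement is the Claim_ definition above) =====
theorem get_max_status_spec : Claim_equal_get_max_status := by
  intro cs _dom hpre
  unfold Spec_get_max_status
  obtain ⟨hent, hentries⟩ := hpre
  obtain ⟨entries, hlk⟩ := Option.isSome_iff_exists.mp hent
  rw [hlk] at hentries
  simp only [Option.getD_some] at hentries
  have hA : get_max_status cs = goA (entries.map (·.2)) 0 := by
    simp [get_max_status, hlk]
  have hB : get_max_status_alt cs = bval (entries.map (·.2)) := by
    simp [get_max_status_alt, bval, hlk]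
  rw [hA, hB, goA_eq (entries.map (·.2)) 0 hentries (by norm_num) (by norm_num)]
  have := bval_nonneg (entries.map (·.2))
  omega
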